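-- pv_equiv track=rewrite | github.com/Trietptm-on-Coding-Algorithms/ProjectEuler-4 | Project-Euler-012.py | add_triangle_number_sequence
-- ===== SOURCE A (Python) =====
-- def add_triangle_number_sequence(length):
-- 	if (length < 1):
-- 		return None
-- 	else:
-- 		y = 0
-- 		for x in range(1, length + 1):
-- 			y += x
-- 		return y
-- ===== SOURCE B (Python) =====
-- def add_triangle_number_sequence(length):
--     if length < 1:
--         return None
--     if length % 2 == 0:
--         return (length // 2) * (length + 1)
--     return length * ((length + 1) // 2)
-- ===== Notes on version B (the rewrite author's own statement) =====
-- stated objective: faster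
-- what changed: Replaces the O(n) accumulation loop over range(1, length+1) with an O(1) closed form, split by parity so the even factor is halved before multiplying ((length//2)*(length+1) or length*((length+1)//2)).
import Mathlib
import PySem

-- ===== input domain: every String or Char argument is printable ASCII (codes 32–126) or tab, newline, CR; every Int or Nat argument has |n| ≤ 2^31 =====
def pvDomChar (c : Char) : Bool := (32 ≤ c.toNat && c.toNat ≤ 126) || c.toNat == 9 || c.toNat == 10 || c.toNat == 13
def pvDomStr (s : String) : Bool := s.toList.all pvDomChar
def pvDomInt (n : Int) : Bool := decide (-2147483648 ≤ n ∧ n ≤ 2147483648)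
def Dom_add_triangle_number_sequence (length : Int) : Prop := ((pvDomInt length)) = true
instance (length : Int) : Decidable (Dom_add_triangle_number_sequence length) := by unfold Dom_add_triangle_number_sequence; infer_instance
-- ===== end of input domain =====

-- B replaces A's O(length) summation loop with a parity-split closed form ((length//2)*(length+1) or length*((length+1)//2)) (objective: faster, asymptotic).


-- ===== PORT A =====
def add_triangle_number_sequence (length : Int) : Option Int :=
  if length < 1 then none
  else some ((PySem.List.pyRange 1 (length + 1) 1).foldl (fun y x => y + x) 0)

-- ===== PORT B =====
def add_triangle_number_sequence_alt (length : Int) : Option Int :=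
  if length < 1 then none
  else if PySem.Int.mod length 2 = 0 then
    some (PySem.Int.floordiv length 2 * (length + 1))
  else
    some (length * PySem.Int.floordiv (length + 1) 2)

-- ===== PRECONDITION & SPEC =====
def Spec_add_triangle_number_sequence (length : Int) (out : Option Int) : Prop := out = add_triangle_number_sequence_alt length
instance (length : Int) (out : Option Int) : Decidable (Spec_add_triangle_number_sequence length out) := by unfold Spec_add_triangle_number_sequence; infer_instance

-- ===== CLAIM (what is proved, stated in full; the proofs are below) =====
def Claim_equal_add_triangle_number_sequence : Prop := ∀ (length : Int), Dom_add_triangle_number_sequence length → Spec_add_triangle_number_sequence length (add_triangle_number_sequence length)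

-- ===== LEMMAS AND PROOFS =====

-- Gauss's sum over Python's range(1, k+1), with Int ediv.
theorem tri_foldl (k : Nat) :
    (PySem.List.pyRange 1 ((k : Int) + 1) 1).foldl (fun y x => y + x) 0
      = ((k : Int) * ((k : Int) + 1)) / 2 := by
  induction k with
  | zero => simp [PySem.List.pyRange_one_eq_nil]
  | succ n ih =>
      have h : PySem.List.pyRange 1 ((n : Int) + 1 + 1) 1
          = PySem.List.pyRange 1 ((n : Int) + 1) 1 ++ [(n : Int) + 1] :=
        PySem.List.pyRange_one_succ_right (by omega)
      push_cast
      rw [h, List.foldl_append, ih]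
      simp only [List.foldl_cons, List.foldl_nil]
      have he : ((n : Int) + 1) * ((n : Int) + 1 + 1)
          = (n : Int) * ((n : Int) + 1) + ((n : Int) + 1) * 2 := by ring
      rw [he, Int.add_mul_ediv_right _ _ (by norm_num)]

-- ===== VERDICT (by name: the statement is the Claim_ definition above) =====
theorem add_triangle_number_sequence_spec : Claim_equal_add_triangle_number_sequence := by
  intro length _
  unfold Spec_add_triangle_number_sequence add_triangle_number_sequence add_triangle_number_sequence_alt
  split_ifs with h hpar
  · rfl
  · -- even branch: length = 2*m
    have hk : ∃ k : Nat, length = (k : Int) := ⟨length.toNat, by omega⟩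
    obtain ⟨k, rfl⟩ := hk
    rw [tri_foldl]
    have hdvd : (2 : Int) ∣ (k : Int) := by
      rw [← PySem.Int.mod_eq_zero_iff_dvd]; exact hpar
    obtain ⟨m, hm⟩ := hdvd
    rw [PySem.Int.floordiv_eq_ediv_of_pos (by norm_num), hm]
    rw [Int.mul_ediv_cancel_left _ (by norm_num : (2:Int) ≠ 0)]
    have : 2 * m * (2 * m + 1) = 2 * (m * (2 * m + 1)) := by ring
    rw [this, Int.mul_ediv_cancel_left _ (by norm_num : (2:Int) ≠ 0)]
  · -- odd branch: length + 1 = 2*m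
    have hk : ∃ k : Nat, length = (k : Int) := ⟨length.toNat, by omega⟩
    obtain ⟨k, rfl⟩ := hk
    rw [tri_foldl]
    have hmod : PySem.Int.mod (k : Int) 2 = (k : Int) % 2 :=
      PySem.Int.mod_eq_emod_of_pos (by norm_num)
    have hodd : (k : Int) % 2 = 1 := by
      rw [hmod] at hpar; omega
    have hdvd : (2 : Int) ∣ ((k : Int) + 1) := by omega
    obtain ⟨m, hm⟩ := hdvd
    rw [PySem.Int.floordiv_eq_ediv_of_pos (by norm_num), hm]
    rw [Int.mul_ediv_cancel_left _ (by norm_num : (2:Int) ≠ 0)]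
    have : (k : Int) * (2 * m) = 2 * ((k : Int) * m) := by ring
    rw [this, Int.mul_ediv_cancel_left _ (by norm_num : (2:Int) ≠ 0)]
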